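-- pv_equiv track=rewrite | github.com/KdeejaMstafa/AI-powered-SOC-log-triage-tool | src/main.py | pick_one_per_source
-- ===== SOURCE A (Python) =====
-- def pick_one_per_source(events):
--     suricata = [e for e in events if e["source"] == "suricata"]
--     auth = [e for e in events if e["source"] == "auth"]
--     access = [e for e in events if e["source"] == "access"]
--
--     final = []
--     if suricata:
--         final.append(suricata[0])
--     if auth:
--         final.append(auth[0])
--     if access:
--         final.append(access[0])
--
--     return final
-- ===== SOURCE B (Python) =====
-- def pick_one_per_source(events):
--     known = ("suricata", "auth", "access")
--     firsts = {}
--     for e in events: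
--         src = e["source"]
--         if src in known and src not in firsts:
--             firsts[src] = e
--     return [firsts[s] for s in known if s in firsts]
-- ===== Notes on version B (the rewrite author's own statement) =====
-- stated objective: simpler
-- what changed: Replaces three full filter passes over the events with one pass recording the first event per known source in a dict, then emits them in the fixed order suricata/auth/access.
import Mathlib
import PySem

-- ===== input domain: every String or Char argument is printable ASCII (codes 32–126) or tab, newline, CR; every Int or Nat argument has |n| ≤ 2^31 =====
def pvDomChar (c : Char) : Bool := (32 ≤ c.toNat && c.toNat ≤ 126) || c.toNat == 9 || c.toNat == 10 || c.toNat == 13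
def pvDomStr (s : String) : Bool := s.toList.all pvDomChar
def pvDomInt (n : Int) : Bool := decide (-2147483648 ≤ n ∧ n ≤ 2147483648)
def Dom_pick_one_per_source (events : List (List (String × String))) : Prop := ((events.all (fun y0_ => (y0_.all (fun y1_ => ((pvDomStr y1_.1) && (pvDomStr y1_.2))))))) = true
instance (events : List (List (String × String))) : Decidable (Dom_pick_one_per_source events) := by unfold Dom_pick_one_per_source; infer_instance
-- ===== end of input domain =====

-- B changes the algorithm only: one pass with a first-per-source dict instead of three filter passes; same return value.

-- shared helper: e["source"] as first-match lookup, totalized with "" (Pre_ keeps the key present)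
def pvSrc (e : List (String × String)) : String :=
  ((e.find? (fun p => p.1 == "source")).map Prod.snd).getD ""

-- ===== PORT A =====
def pick_one_per_source (events : List (List (String × String))) : List (List (String × String)) :=
  let suricata := events.filter (fun e => pvSrc e == "suricata")
  let auth := events.filter (fun e => pvSrc e == "auth")
  let access := events.filter (fun e => pvSrc e == "access")
  (match suricata.head? with | some e => [e] | none => []) ++
  (match auth.head? with | some e => [e] | none => []) ++
  (match access.head? with | some e => [e] | none => [])

-- ===== PORT B =====
def pick_one_per_source_alt (events : List (List (String × String))) : List (List (String × String)) :=
  let known := ["suricata", "auth", "access"]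
  let firsts := events.foldl (fun d e =>
    let src := pvSrc e
    if known.contains src && !(d.contains src) then d.insert src e else d)
    (PySem.Dict.empty : PySem.Dict String (List (String × String)))
  known.filterMap (fun s => firsts.get? s)

-- ===== PRECONDITION & SPEC =====
-- Pre_ excludes events without a "source" key, on which the Python A raises KeyError.
def Pre_pick_one_per_source (events : List (List (String × String))) : Prop :=
  (events.all (fun e => e.any (fun p => p.1 == "source"))) = true
instance (events : List (List (String × String))) : Decidable (Pre_pick_one_per_source events) := by unfold Pre_pick_one_per_source; infer_instance
def pvWitness_pick_one_per_source : (List (List (String × String))) :=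
  [[("source", "auth"), ("msg", "hi")], [("source", "suricata")]]
def Spec_pick_one_per_source (events : List (List (String × String))) (out : List (List (String × String))) : Prop := out = pick_one_per_source_alt events
instance (events : List (List (String × String))) (out : List (List (String × String))) : Decidable (Spec_pick_one_per_source events out) := by unfold Spec_pick_one_per_source; infer_instance

-- ===== CLAIM (what is proved, stated in full; the proofs are below) =====
def Claim_equal_pick_one_per_source : Prop := ∀ (events : List (List (String × String))), Dom_pick_one_per_source events → Pre_pick_one_per_source events → Spec_pick_one_per_source events (pick_one_per_source events)

-- ===== LEMMAS AND PROOFS =====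

-- invariant of B's loop: looking up s after the fold yields d's binding if any, else the first matching event
lemma fold_get? (events : List (List (String × String)))
    (d : PySem.Dict String (List (String × String))) (s : String)
    (hs : ["suricata", "auth", "access"].contains s = true) :
    (events.foldl (fun d e =>
        let src := pvSrc e
        if ["suricata", "auth", "access"].contains src && !(d.contains src) then d.insert src e else d) d).get? s
      = ((d.get? s).or ((events.filter (fun e => pvSrc e == s)).head?)) := by
  induction events generalizing d with
  | nil => simp
  | cons e rest ih =>
    simp only [List.foldl_cons, List.filter_cons]
    by_cases hsrc : pvSrc e = s
    · subst hsrc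
      cases hg : d.get? (pvSrc e) with
      | some v =>
        have hc : d.contains (pvSrc e) = true := by
          rw [PySem.Dict.contains_eq_isSome_get?, hg]; rfl
        have hcond : ¬ ((["suricata", "auth", "access"].contains (pvSrc e) && !(d.contains (pvSrc e))) = true) := by
          simp [hc]
        rw [if_neg hcond, ih d, hg]
        simp
      | none =>
        have hc : d.contains (pvSrc e) = false := by
          rw [PySem.Dict.contains_eq_isSome_get?, hg]; rfl
        have hcond : (["suricata", "auth", "access"].contains (pvSrc e) && !(d.contains (pvSrc e))) = true := by
          rw [hs, hc]; rfl
        rw [if_pos hcond, ih (d.insert (pvSrc e) e), PySem.Dict.get?_insert_self]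
        simp
    · have hne : (pvSrc e == s) = false := by simpa using hsrc
      by_cases hcond : (["suricata", "auth", "access"].contains (pvSrc e) && !(d.contains (pvSrc e))) = true
      · rw [if_pos hcond, ih (d.insert (pvSrc e) e),
          PySem.Dict.get?_insert_of_ne d e (show s ≠ pvSrc e from fun h => hsrc h.symm)]
        simp [hne]
      · rw [if_neg hcond, ih d]
        simp [hne]

-- ===== VERDICT (by name: the statement is the Claim_ definition above) =====
theorem pick_one_per_source_spec : Claim_equal_pick_one_per_source := by
  intro events _ _
  unfold Spec_pick_one_per_source pick_one_per_source pick_one_per_source_alt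
  simp only [List.filterMap]
  rw [fold_get? events _ "suricata" (by decide),
      fold_get? events _ "auth" (by decide),
      fold_get? events _ "access" (by decide)]
  simp only [PySem.Dict.get?_empty, Option.orElse]
  cases (events.filter (fun e => pvSrc e == "suricata")).head? <;>
  cases (events.filter (fun e => pvSrc e == "auth")).head? <;>
  cases (events.filter (fun e => pvSrc e == "access")).head? <;> rfl
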